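-- pv_equiv track=rewrite | github.com/debdattasarkar/DSA | 2. GFG/3. Top 50 Array Problems/14. (M) Longest alternating subsequence/py_sol.py | alternatingMaxLength
-- ===== SOURCE A (Python) =====
-- def alternatingMaxLength(arr):
--     """
--     Greedy wiggle DP in O(n) time, O(1) space.
--     up   = best LAS length ending here where the last step went up
--     down = best LAS length ending here where the last step went down
--     """
--     n = len(arr)
--     if n == 0:
--         return 0
--     # Single element is trivially alternating
--     up = down = 1
--
--     for i in range(1, n):
--         if arr[i] > arr[i - 1]:
--             # We can extend a "down" by going up
--             up = down + 1
--         elif arr[i] < arr[i - 1]: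
--             # We can extend an "up" by going down
--             down = up + 1
--         # else: equal -> ignore; no change
--
--     return max(up, down)
-- ===== SOURCE B (Python) =====
-- def alternatingMaxLength(arr):
--     # sign-change counter over adjacent pairs, instead of the up/down DP pair
--     if not arr:
--         return 0
--     count, prev_sign = 1, 0
--     for prev, cur in zip(arr, arr[1:]):
--         d = cur - prev
--         if d != 0:
--             sign = 1 if d > 0 else -1
--             if sign != prev_sign:
--                 count += 1
--                 prev_sign = sign
--     return count
-- ===== Notes on version B (the rewrite author's own statement) =====
-- stated objective: alternative
-- what changed: Replaces the up/down DP pair combined by a final max with a single sign-change counter over adjacent pairs (zip) that increments only when the step direction flips.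
import Mathlib
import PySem

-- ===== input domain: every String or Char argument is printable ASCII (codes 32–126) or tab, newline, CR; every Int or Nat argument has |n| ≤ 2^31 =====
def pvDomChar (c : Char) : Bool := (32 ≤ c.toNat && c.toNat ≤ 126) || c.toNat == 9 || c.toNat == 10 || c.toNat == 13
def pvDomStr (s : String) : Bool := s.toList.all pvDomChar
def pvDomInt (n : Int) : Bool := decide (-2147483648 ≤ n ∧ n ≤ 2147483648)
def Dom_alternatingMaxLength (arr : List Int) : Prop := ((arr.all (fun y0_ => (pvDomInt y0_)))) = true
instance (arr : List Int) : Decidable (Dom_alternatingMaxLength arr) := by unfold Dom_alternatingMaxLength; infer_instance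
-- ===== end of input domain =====

-- B replaces A's up/down DP pair (combined by a final max) with a single
-- sign-change counter over adjacent pairs; same O(n) cost, different state.

-- ===== PORT A =====
def alternatingMaxLength (arr : List Int) : Int :=
  let n : Int := PySem.List.len arr
  if n = 0 then 0
  else
    let ud : Int × Int :=
      (PySem.List.pyRange 1 n 1).foldl (fun (ud : Int × Int) i =>
        if PySem.List.pyGetD arr i 0 > PySem.List.pyGetD arr (i - 1) 0 then (ud.2 + 1, ud.2)
        else if PySem.List.pyGetD arr i 0 < PySem.List.pyGetD arr (i - 1) 0 then (ud.1, ud.1 + 1)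
        else ud) (1, 1)
    max ud.1 ud.2

-- ===== PORT B =====
def alternatingMaxLength_alt (arr : List Int) : Int :=
  if arr = [] then 0
  else
    let cs : Int × Int :=
      (arr.zip (PySem.List.slice arr (some 1) none)).foldl (fun (cs : Int × Int) pc =>
        let d := pc.2 - pc.1
        if d ≠ 0 then
          let sign : Int := if d > 0 then 1 else -1
          if sign ≠ cs.2 then (cs.1 + 1, sign) else cs
        else cs) (1, 0)
    cs.1

-- ===== PRECONDITION & SPEC =====
def Spec_alternatingMaxLength (arr : List Int) (out : Int) : Prop := out = alternatingMaxLength_alt arr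
instance (arr : List Int) (out : Int) : Decidable (Spec_alternatingMaxLength arr out) := by unfold Spec_alternatingMaxLength; infer_instance

-- ===== CLAIM (what is proved, stated in full; the proofs are below) =====
def Claim_equal_alternatingMaxLength : Prop := ∀ (arr : List Int), Dom_alternatingMaxLength arr → Spec_alternatingMaxLength arr (alternatingMaxLength arr)

-- ===== LEMMAS AND PROOFS =====

-- A's step and B's step, as named functions on a pair of adjacent elements.
def pvStepA (ud : Int × Int) (p : Int × Int) : Int × Int :=
  if p.2 > p.1 then (ud.2 + 1, ud.2)
  else if p.2 < p.1 then (ud.1, ud.1 + 1)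
  else ud

def pvStepB (cs : Int × Int) (pc : Int × Int) : Int × Int :=
  let d := pc.2 - pc.1
  if d ≠ 0 then
    let sign : Int := if d > 0 then 1 else -1
    if sign ≠ cs.2 then (cs.1 + 1, sign) else cs
  else cs

-- the invariant tying A's (up, down) state to B's (count, prev_sign) state
def pvR (u d c sg : Int) : Prop :=
  (sg = 0 ∧ u = c ∧ d = c) ∨ (sg = 1 ∧ u = c ∧ d = c - 1) ∨ (sg = -1 ∧ d = c ∧ u = c - 1)

lemma pvR_step (u d c sg : Int) (p : Int × Int) (h : pvR u d c sg) :
    pvR (pvStepA (u, d) p).1 (pvStepA (u, d) p).2 (pvStepB (c, sg) p).1 (pvStepB (c, sg) p).2 := by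
  obtain ⟨a, b⟩ := p
  simp only [pvStepA, pvStepB, pvR] at *
  rcases h with ⟨h1, h2, h3⟩ | ⟨h1, h2, h3⟩ | ⟨h1, h2, h3⟩ <;> subst h1 <;>
    split_ifs <;> simp_all <;> omega

lemma pvR_fold (ps : List (Int × Int)) : ∀ (u d c sg : Int), pvR u d c sg →
    pvR (ps.foldl pvStepA (u, d)).1 (ps.foldl pvStepA (u, d)).2
        (ps.foldl pvStepB (c, sg)).1 (ps.foldl pvStepB (c, sg)).2 := by
  induction ps with
  | nil => intro u d c sg h; simpa using h
  | cons p t ih =>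
      intro u d c sg h
      have h' := pvR_step u d c sg p h
      simpa [List.foldl_cons] using
        ih (pvStepA (u, d) p).1 (pvStepA (u, d) p).2 (pvStepB (c, sg) p).1 (pvStepB (c, sg) p).2 h'

-- A's indexed loop over range(1, n) equals a fold over the list of adjacent pairs.
lemma pv_range_fold_eq_zip (f : Int × Int → Int → Int → Int × Int) :
    ∀ (xs : List Int) (s : Int × Int),
      (List.range (xs.length - 1)).foldl
        (fun s k => f s (xs.getD k 0) (xs.getD (k + 1) 0)) s
      = (xs.zip (xs.drop 1)).foldl (fun s p => f s p.1 p.2) s := by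
  intro xs
  induction xs with
  | nil => intro s; simp
  | cons x ys ih =>
      intro s
      cases ys with
      | nil => simp
      | cons y t =>
          have hlen : (x :: y :: t).length - 1 = t.length + 1 := by simp
          rw [hlen, List.range_succ_eq_map, List.foldl_cons, List.foldl_map]
          simp only [List.getD_cons_zero, List.getD_cons_succ]
          have := ih (f s x y)
          simp only [List.length_cons, Nat.add_sub_cancel, List.drop_one, List.tail_cons] at this ⊢
          exact this

lemma pvA_fold_eq (arr : List Int) (s : Int × Int) :
    (PySem.List.pyRange 1 (PySem.List.len arr) 1).foldl
      (fun (ud : Int × Int) i =>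
        if PySem.List.pyGetD arr i 0 > PySem.List.pyGetD arr (i - 1) 0 then (ud.2 + 1, ud.2)
        else if PySem.List.pyGetD arr i 0 < PySem.List.pyGetD arr (i - 1) 0 then (ud.1, ud.1 + 1)
        else ud) s
    = (arr.zip (arr.drop 1)).foldl pvStepA s := by
  rw [PySem.List.pyRange_one, List.foldl_map]
  have hcast : ((PySem.List.len arr : Int) - 1).toNat = arr.length - 1 := by
    simp only [PySem.List.len_eq]; omega
  rw [hcast]
  have key := pv_range_fold_eq_zip (fun s a b =>
      if b > a then (s.2 + 1, s.2) else if b < a then (s.1, s.1 + 1) else s) arr s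
  have harg : ∀ (k : Nat),
      PySem.List.pyGetD arr ((1 : Int) + k) 0 = arr.getD (k + 1) 0 ∧
      PySem.List.pyGetD arr ((1 : Int) + k - 1) 0 = arr.getD k 0 := by
    intro k
    constructor
    · have : ((1 : Int) + k) = ((k + 1 : Nat) : Int) := by omega
      rw [this, PySem.List.pyGetD_natCast]
    · have : ((1 : Int) + k - 1) = ((k : Nat) : Int) := by omega
      rw [this, PySem.List.pyGetD_natCast]
  have hfun : (fun (ud : Int × Int) (k : Nat) =>
      if PySem.List.pyGetD arr (1 + (k : Int)) 0 > PySem.List.pyGetD arr (1 + (k : Int) - 1) 0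
        then (ud.2 + 1, ud.2)
      else if PySem.List.pyGetD arr (1 + (k : Int)) 0 < PySem.List.pyGetD arr (1 + (k : Int) - 1) 0
        then (ud.1, ud.1 + 1) else ud)
      = (fun (ud : Int × Int) (k : Nat) =>
      if arr.getD (k + 1) 0 > arr.getD k 0 then (ud.2 + 1, ud.2)
      else if arr.getD (k + 1) 0 < arr.getD k 0 then (ud.1, ud.1 + 1) else ud) := by
    funext ud k
    rw [(harg k).1, (harg k).2]
  rw [hfun]
  exact key

lemma pvR_max (u d c sg : Int) (h : pvR u d c sg) : max u d = c := by
  rcases h with ⟨_, h2, h3⟩ | ⟨_, h2, h3⟩ | ⟨_, h2, h3⟩ <;> subst h2 <;> subst h3 <;> omega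

-- ===== VERDICT (by name: the statement is the Claim_ definition above) =====
theorem alternatingMaxLength_spec : Claim_equal_alternatingMaxLength := by
  intro arr _
  unfold Spec_alternatingMaxLength alternatingMaxLength alternatingMaxLength_alt
  rcases arr with _ | ⟨x, t⟩
  · simp [PySem.List.len]
  · have hne : (x :: t) ≠ [] := by simp
    have hn : (PySem.List.len (x :: t) : Int) ≠ 0 := by
      simp only [PySem.List.len_eq, List.length_cons]; omega
    simp only [hn, hne, if_false]
    rw [pvA_fold_eq (x :: t) (1, 1), PySem.List.slice_from_one]
    have hB : ((x :: t).zip (x :: t).tail).foldl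
        (fun (cs : Int × Int) pc =>
          let d := pc.2 - pc.1
          if d ≠ 0 then
            let sign : Int := if d > 0 then 1 else -1
            if sign ≠ cs.2 then (cs.1 + 1, sign) else cs
          else cs) ((1 : Int), (0 : Int))
        = ((x :: t).zip ((x :: t).drop 1)).foldl pvStepB (1, 0) := by
      rfl
    rw [hB]
    have hR0 : pvR 1 1 1 0 := Or.inl ⟨rfl, rfl, rfl⟩
    have := pvR_fold ((x :: t).zip ((x :: t).drop 1)) 1 1 1 0 hR0
    exact pvR_max _ _ _ _ this
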